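-- pv_equiv track=rewrite | github.com/johnmica1993-svg/findy-buscador | scripts/procesar_rapido.py | detectar_campo
-- ===== SOURCE A (Python) =====
-- def detectar_campo(col):
--     col_l = col.lower().replace(' ','').replace('_','')
--     if 'cups' in col_l: return 'cups'
--     if any(x in col_l for x in ['dni','nif','nie']): return 'dni'
--     if any(x in col_l for x in ['nombre','titular']): return 'nombre'
--     if any(x in col_l for x in ['direccion','calle','domicilio']): return 'direccion'
--     if 'campan' in col_l or 'comercializador' in col_l: return 'campana'
--     if 'estado' in col_l or 'status' in col_l: return 'estado'
--     return col
-- ===== SOURCE B (Python) =====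
-- # Text-driven scan: slide over every position of the normalized string, take the
-- # best (minimum) priority of any keyword starting there; A instead tests each
-- # rule's containment in order.
-- KEYWORDS = [('cups', 0), ('dni', 1), ('nif', 1), ('nie', 1),
--             ('nombre', 2), ('titular', 2),
--             ('direccion', 3), ('calle', 3), ('domicilio', 3),
--             ('campan', 4), ('comercializador', 4),
--             ('estado', 5), ('status', 5)]
-- LABELS = ['cups', 'dni', 'nombre', 'direccion', 'campana', 'estado']
--
-- def _prio(t):
--     # priority of the best keyword that is a prefix of t (6 = none);
--     # KEYWORDS is sorted by priority, so the first prefix hit is the best one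
--     for kw, pr in KEYWORDS:
--         if t.startswith(kw):
--             return pr
--     return 6
--
-- def detectar_campo(col):
--     s = col.lower().replace(' ', '').replace('_', '')
--     best = 6
--     t = s
--     while t:
--         p = _prio(t)
--         if p < best:
--             best = p
--         t = t[1:]
--     return LABELS[best] if best < 6 else col
-- ===== Notes on version B (the rewrite author's own statement) =====
-- stated objective: alternative
-- what changed: Instead of testing each rule's substring containment in priority order, B slides once over the normalized string and, at every position, records the minimum priority of any keyword starting there (the keyword table is sorted by priority, so a first-prefix hit is that minimum); the final minimum indexes the label table, falling back to the original column name.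
import Mathlib
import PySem

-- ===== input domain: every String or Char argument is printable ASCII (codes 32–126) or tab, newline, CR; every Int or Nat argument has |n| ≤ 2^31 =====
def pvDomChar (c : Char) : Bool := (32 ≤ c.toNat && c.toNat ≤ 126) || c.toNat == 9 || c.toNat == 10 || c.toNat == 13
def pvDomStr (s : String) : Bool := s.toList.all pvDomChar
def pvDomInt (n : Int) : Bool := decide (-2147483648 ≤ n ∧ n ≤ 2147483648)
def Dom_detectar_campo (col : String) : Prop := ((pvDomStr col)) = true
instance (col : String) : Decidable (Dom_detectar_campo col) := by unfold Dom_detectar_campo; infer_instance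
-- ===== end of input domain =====

-- B replaces A's ordered containment rules by a text-driven scan: it slides over every
-- position of the normalized string and keeps the minimum priority of any keyword
-- starting there (objective: alternative algorithm, same asymptotic cost).


-- ===== PORT A =====
def detectar_campo (col : String) : String :=
  let col_l := PySem.Str.replace (PySem.Str.replace (PySem.Str.lower col) " " "") "_" ""
  if PySem.Str.isIn "cups" col_l then "cups"
  else if ["dni", "nif", "nie"].any (fun x => PySem.Str.isIn x col_l) then "dni"
  else if ["nombre", "titular"].any (fun x => PySem.Str.isIn x col_l) then "nombre"
  else if ["direccion", "calle", "domicilio"].any (fun x => PySem.Str.isIn x col_l) then "direccion"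
  else if PySem.Str.isIn "campan" col_l || PySem.Str.isIn "comercializador" col_l then "campana"
  else if PySem.Str.isIn "estado" col_l || PySem.Str.isIn "status" col_l then "estado"
  else col

-- ===== PORT B =====  (transliteration of Source B)
def pvKeywords : List (String × Int) :=
  [("cups", 0), ("dni", 1), ("nif", 1), ("nie", 1),
   ("nombre", 2), ("titular", 2),
   ("direccion", 3), ("calle", 3), ("domicilio", 3),
   ("campan", 4), ("comercializador", 4),
   ("estado", 5), ("status", 5)]

def pvLabels : List String := ["cups", "dni", "nombre", "direccion", "campana", "estado"]

-- _prio's for-loop with early return → recursion over the keyword list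
def pvPrioGo (t : List Char) : List (String × Int) → Int
  | [] => 6
  | e :: rest => if PySem.Chars.startswith t e.1.toList then e.2 else pvPrioGo t rest

def pvPrio (t : List Char) : Int := pvPrioGo t pvKeywords

-- the while-loop: t starts as s and is replaced by t[1:] (= its tail) until empty
def pvScan : List Char → Int → Int
  | [], best => best
  | c :: rest, best =>
    let p := pvPrio (c :: rest)
    pvScan rest (if p < best then p else best)

def detectar_campo_alt (col : String) : String :=
  let s := PySem.Str.replace (PySem.Str.replace (PySem.Str.lower col) " " "") "_" ""
  let best := pvScan s.toList 6
  -- LABELS[best]: here 0 ≤ best < 6, so the lookup is exact (IndexError impossible)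
  if best < 6 then (PySem.List.pyGet? pvLabels best).getD "" else col

-- ===== PRECONDITION & SPEC =====
def Spec_detectar_campo (col : String) (out : String) : Prop := out = detectar_campo_alt col
instance (col : String) (out : String) : Decidable (Spec_detectar_campo col out) := by unfold Spec_detectar_campo; infer_instance

-- ===== CLAIM (what is proved, stated in full; the proofs are below) =====
def Claim_equal_detectar_campo : Prop := ∀ (col : String), Dom_detectar_campo col → Spec_detectar_campo col (detectar_campo col)

-- ===== LEMMAS AND PROOFS =====

-- first match over a keyword list (6 = no match), for an arbitrary test f
def pvFirst (f : String → Bool) : List (String × Int) → Int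
  | [] => 6
  | e :: rest => if f e.1 then e.2 else pvFirst f rest

-- minimum priority among matching keywords (6 = no match)
def pvMin (f : String → Bool) : List (String × Int) → Int
  | [] => 6
  | e :: rest => if f e.1 then min e.2 (pvMin f rest) else pvMin f rest

theorem pvPrioGo_eq_pvFirst (t : List Char) (ks : List (String × Int)) :
    pvPrioGo t ks = pvFirst (fun kw => PySem.Chars.startswith t kw.toList) ks := by
  induction ks with
  | nil => rfl
  | cons e rest ih => simp [pvPrioGo, pvFirst, ih]

theorem pvMin_le_six (f : String → Bool) (ks : List (String × Int)) : pvMin f ks ≤ 6 := by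
  induction ks with
  | nil => simp [pvMin]
  | cons e rest ih => simp only [pvMin]; split <;> omega

theorem pvMin_lb (f : String → Bool) (q : Int) (ks : List (String × Int))
    (hq : q ≤ 6) (h : ∀ e ∈ ks, q ≤ e.2) : q ≤ pvMin f ks := by
  induction ks with
  | nil => simpa [pvMin]
  | cons e rest ih =>
    have h1 := h e (by simp)
    have h2 : q ≤ pvMin f rest := ih (fun e he => h e (by simp [he]))
    simp only [pvMin]; split <;> omega

-- a sorted first-match scan computes the minimum matching priority
theorem pvFirst_eq_pvMin (f : String → Bool) (ks : List (String × Int))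
    (hs : List.Pairwise (fun a b => a.2 ≤ b.2) ks) (hb : ∀ e ∈ ks, e.2 ≤ 6) :
    pvFirst f ks = pvMin f ks := by
  induction ks with
  | nil => rfl
  | cons e rest ih =>
    rcases List.pairwise_cons.mp hs with ⟨he, hrest⟩
    have hlb : e.2 ≤ pvMin f rest :=
      pvMin_lb f e.2 rest (hb e (by simp)) (fun x hx => he x hx)
    have := ih hrest (fun x hx => hb x (by simp [hx]))
    simp only [pvFirst, pvMin]; split
    · omega
    · exact this

theorem pvMin_or (f g : String → Bool) (ks : List (String × Int)) :
    pvMin (fun k => f k || g k) ks = min (pvMin f ks) (pvMin g ks) := by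
  induction ks with
  | nil => simp [pvMin]
  | cons e rest ih =>
    simp only [pvMin, ih]
    cases hf : f e.1 <;> cases hg : g e.1 <;> simp <;> omega

theorem isIn_cons (sub : List Char) (c : Char) (rest : List Char) :
    PySem.Chars.isIn sub (c :: rest)
      = (PySem.Chars.startswith (c :: rest) sub || PySem.Chars.isIn sub rest) := by
  rw [Bool.eq_iff_iff]
  simp [PySem.Chars.isIn_iff_infix, PySem.Chars.startswith_iff, List.infix_cons_iff]

theorem pvMin_congr (f g : String → Bool) (h : ∀ k, f k = g k) (ks : List (String × Int)) :
    pvMin f ks = pvMin g ks := by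
  have : f = g := funext h
  rw [this]

-- the scan over the string computes min(best, minimum priority of any contained keyword)
theorem pvScan_eq (t : List Char) : ∀ m : Int, m ≤ 6 →
    pvScan t m = min m (pvMin (fun kw => PySem.Chars.isIn kw.toList t) pvKeywords) := by
  induction t with
  | nil =>
    intro m hm
    have h6 : pvMin (fun kw => PySem.Chars.isIn kw.toList ([] : List Char)) pvKeywords = 6 := by
      decide
    simp only [pvScan, h6]; omega
  | cons c rest ih =>
    intro m hm
    have hsorted : List.Pairwise (fun a b : String × Int => a.2 ≤ b.2) pvKeywords := by decide
    have hb6 : ∀ e ∈ pvKeywords, e.2 ≤ 6 := by decide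
    have hp : pvPrio (c :: rest)
        = pvMin (fun kw => PySem.Chars.startswith (c :: rest) kw.toList) pvKeywords := by
      rw [pvPrio, pvPrioGo_eq_pvFirst, pvFirst_eq_pvMin _ _ hsorted hb6]
    have hple : pvPrio (c :: rest) ≤ 6 := by rw [hp]; exact pvMin_le_six _ _
    have hsplit : pvMin (fun kw => PySem.Chars.isIn kw.toList (c :: rest)) pvKeywords
        = min (pvMin (fun kw => PySem.Chars.startswith (c :: rest) kw.toList) pvKeywords)
              (pvMin (fun kw => PySem.Chars.isIn kw.toList rest) pvKeywords) := by
      rw [pvMin_congr _ (fun kw => PySem.Chars.startswith (c :: rest) kw.toList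
            || PySem.Chars.isIn kw.toList rest) (fun kw => isIn_cons kw.toList c rest),
          pvMin_or]
    have hm' : (if pvPrio (c :: rest) < m then pvPrio (c :: rest) else m) ≤ 6 := by
      split <;> omega
    simp only [pvScan]
    rw [ih _ hm', hsplit]
    rw [hp]
    split <;> omega

-- ===== VERDICT (by name: the statement is the Claim_ definition above) =====
theorem if_or_collapse (a b : Bool) (x y : Int) :
    (if a then x else if b then x else y) = if (a || b) then x else y := by
  cases a <;> cases b <;> simp

theorem detectar_campo_spec : Claim_equal_detectar_campo := by
  intro col _
  show detectar_campo col = detectar_campo_alt col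
  unfold detectar_campo detectar_campo_alt
  dsimp only
  set s := PySem.Str.replace (PySem.Str.replace (PySem.Str.lower col) " " "") "_" "" with hs
  have hscan := pvScan_eq s.toList 6 (by omega)
  have hle := pvMin_le_six (fun kw => PySem.Chars.isIn kw.toList s.toList) pvKeywords
  have hsorted : List.Pairwise (fun a b : String × Int => a.2 ≤ b.2) pvKeywords := by decide
  have hb6 : ∀ e ∈ pvKeywords, e.2 ≤ 6 := by decide
  have hW : pvScan s.toList 6
      = pvFirst (fun kw => PySem.Chars.isIn kw.toList s.toList) pvKeywords := by
    rw [hscan, pvFirst_eq_pvMin _ _ hsorted hb6]; omega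
  rw [hW]
  simp only [List.any_cons, List.any_nil, Bool.or_false, PySem.Str.isIn_eq]
  simp only [pvFirst, pvKeywords, if_or_collapse]
  split_ifs <;> first | rfl | omega
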